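-- pv_equiv track=rewrite | github.com/khatoan/chingchong-project | Runway problem/canStopIterative.py | canStopIterative
-- ===== SOURCE A (Python) =====
-- def canStopIterative(runway, initSpeed, startIndex=0):
--     if not check_input(runway, initSpeed, startIndex):
--         return False
--     # maximum speed cannot be larger than length of the runway. We will talk about
--     # making this bound tighter later on.
--     maxSpeed = len(runway)
--     negative_conditions = (
--         startIndex >= len(runway)
--         or startIndex < 0
--         or initSpeed < 0
--         or initSpeed > maxSpeed
--         or not runway[startIndex]
--     )
--     if negative_conditions:
--         return False
--     # {position i : set of speeds for which we can stop from position i}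
--     memo = {}
--     # Base cases, we can stop when a position is not a spike and speed is zero.
--     length = len(runway)
--     for position in range(length):
--         if runway[position]:
--             memo[position] = set([0])
--     # Outer loop to go over positions from the last one to the first one
--     for position in reversed(range(length)):
--         # Skip positions which contain spikes
--         if not runway[position]:
--             continue
--         # For each position, go over all possible speeds
--         for speed in range(1, maxSpeed + 1):
--             # Recurrence relation is the same as in the recursive version.
--             for adjustedSpeed in [speed, speed - 1, speed + 1]:
--                 if (
--                     position + adjustedSpeed in memo
--                     and adjustedSpeed in memo[position + adjustedSpeed]
--                 ):  # Duplicate line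
--                     memo[position].add(speed)
--                     break
--     return initSpeed in memo[startIndex]
--
-- def check_input(runway, initSpeed, startIndex):
--     if not isinstance(runway, list) or runway == None or runway == []:
--         return False
--     for i in runway:
--         if not isinstance(i, bool):
--             return False
--     if initSpeed is None or not isinstance(initSpeed, int):
--         return False
--     if startIndex is None or not isinstance(startIndex, int):
--         return False
--     return True
-- ===== SOURCE B (Python) =====
-- def canStopIterative(runway, initSpeed, startIndex=0):
--     # Forward reachability instead of backward can-stop DP: sweep positions
--     # left-to-right from startIndex, propagating which speeds are reachable
--     # from the start state; succeed as soon as speed 1 is reachable at a safe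
--     # cell (then one more move with speed 0 stops). Speeds are pruned at
--     # maxS ~ sqrt(2n): stopping from speed s needs s(s-1)/2 cells ahead.
--     if (not isinstance(runway, list) or runway == [] or
--             any(not isinstance(x, bool) for x in runway) or
--             initSpeed is None or not isinstance(initSpeed, int) or
--             startIndex is None or not isinstance(startIndex, int)):
--         return False
--     n = len(runway)
--     if (startIndex >= n or startIndex < 0 or initSpeed < 0 or initSpeed > n
--             or not runway[startIndex]):
--         return False
--     if initSpeed == 0:
--         return True
--     # maxS = least s >= 1 with s*(s+1)//2 > n-1; no state with speed > maxS
--     # can ever stop, so such states need not be explored.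
--     maxS = 1
--     while maxS * (maxS + 1) // 2 <= n - 1:
--         maxS += 1
--     if initSpeed > maxS:
--         return False
--     # reach[p][s]: state (position p, speed s) is reachable from the start.
--     reach = [[False] * (maxS + 1) for _ in range(n)]
--     reach[startIndex][initSpeed] = True
--     for p in range(startIndex, n):
--         row = reach[p]
--         if row[1]:
--             return True
--         for s in range(2, maxS + 1):
--             if row[s]:
--                 for a in (s - 1, s, s + 1):
--                     if a <= maxS and p + a < n and runway[p + a]:
--                         reach[p + a][a] = True
--     return False
-- ===== Notes on version B (the rewrite author's own statement) =====
-- stated objective: alternative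
-- what changed: Replaces A's backward can-stop DP (for every cell and every speed 1..n, dict of speed-sets) by a forward reachability sweep: starting from the single state (startIndex, initSpeed) it propagates reachable speeds left-to-right, succeeds as soon as speed 1 is reachable at a safe cell, and prunes speeds above maxS ~ sqrt(2n) since stopping from speed s needs s(s-1)/2 cells.
import Mathlib
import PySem

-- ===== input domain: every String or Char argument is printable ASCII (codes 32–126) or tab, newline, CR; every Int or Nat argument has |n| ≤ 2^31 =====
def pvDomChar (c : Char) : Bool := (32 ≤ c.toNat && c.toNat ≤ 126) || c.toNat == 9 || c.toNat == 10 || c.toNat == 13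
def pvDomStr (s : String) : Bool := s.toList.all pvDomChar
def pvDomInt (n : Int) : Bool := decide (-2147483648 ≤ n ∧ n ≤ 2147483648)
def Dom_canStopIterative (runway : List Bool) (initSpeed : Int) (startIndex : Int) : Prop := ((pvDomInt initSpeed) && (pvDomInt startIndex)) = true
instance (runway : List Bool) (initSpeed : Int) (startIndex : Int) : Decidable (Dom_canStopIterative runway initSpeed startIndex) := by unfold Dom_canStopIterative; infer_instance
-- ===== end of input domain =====

-- B replaces A's backward can-stop DP over every cell/speed by a FORWARD reachability sweep
-- from the start state, with speeds pruned at maxS ~ sqrt(2n) (a genuinely different algorithm).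

-- ===== PORT A =====
-- check_input: under the type convention runway is a list of bool and the speeds are ints,
-- so every isinstance test passes; only `runway == []` can make it return False.
def check_input (runway : List Bool) (initSpeed : Int) (startIndex : Int) : Bool :=
  if runway = [] then false else true

-- Port of A. `negative_conditions` is a lazy `or`, rendered as the nested ifs below
-- (runway[startIndex] is only read once the index checks passed, so pyGetD is exact).
-- `memo[position].add(speed)` is Dict.modify (the key is present: position is good);
-- the final `initSpeed in memo[startIndex]` is Set.contains of Dict.getD (the key
-- startIndex is present there, since runway[startIndex] is true).
def canStopIterative (runway : List Bool) (initSpeed : Int) (startIndex : Int) : Bool :=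
  if !(check_input runway initSpeed startIndex) then false
  else
    let maxSpeed : Int := PySem.List.len runway
    if startIndex ≥ PySem.List.len runway then false
    else if startIndex < 0 then false
    else if initSpeed < 0 then false
    else if initSpeed > maxSpeed then false
    else if !(PySem.List.pyGetD runway startIndex false) then false
    else
      let length : Int := PySem.List.len runway
      let memo0 : PySem.Dict Int (PySem.Set Int) :=
        (PySem.List.pyRange 0 length 1).foldl (fun memo position =>
          if PySem.List.pyGetD runway position false then
            memo.insert position (PySem.Set.ofList [0])
          else memo) PySem.Dict.empty
      let memo : PySem.Dict Int (PySem.Set Int) :=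
        ((PySem.List.pyRange 0 length 1).reverse).foldl (fun memo position =>
          if !(PySem.List.pyGetD runway position false) then memo
          else
            (PySem.List.pyRange 1 (maxSpeed + 1) 1).foldl (fun memo speed =>
              -- for-loop over [speed, speed-1, speed+1] with break on the first hit:
              -- the body only adds `speed`, so it is `any` followed by one add
              if [speed, speed - 1, speed + 1].any (fun adjustedSpeed =>
                  memo.contains (position + adjustedSpeed) &&
                  PySem.Set.contains (memo.getD (position + adjustedSpeed) PySem.Set.empty) adjustedSpeed)
              then memo.modify position PySem.Set.empty (fun st => PySem.Set.add st speed)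
              else memo) memo) memo0
      PySem.Set.contains (memo.getD startIndex PySem.Set.empty) initSpeed

-- ===== PORT B =====
-- while maxS*(maxS+1)//2 <= n-1: maxS += 1
def bMaxS (n : Int) (s : Int) : Int :=
  if h : PySem.Int.floordiv (s * (s + 1)) 2 ≤ n - 1 then bMaxS n (s + 1) else s
termination_by (n - s).toNat
decreasing_by
  have h2 : PySem.Int.floordiv (s * (s + 1)) 2 = (s * (s + 1)) / 2 :=
    PySem.Int.floordiv_eq_ediv_of_pos (by norm_num)
  have hnn : 0 ≤ s * (s + 1) := by nlinarith [sq_nonneg s, sq_nonneg (s + 1)]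
  have hs : s ≤ s * (s + 1) / 2 := by
    by_cases hs0 : s ≤ 0
    · exact le_trans hs0 (Int.ediv_nonneg hnn (by norm_num))
    · rw [not_le] at hs0
      have : 2 * s ≤ s * (s + 1) := by nlinarith
      omega
  rw [h2] at h
  omega

-- B-side loop bodies, named transliterations of B's inline loops:
-- `reach[p+a][a] = True` guarded by `a <= maxS and p+a < n and runway[p+a]`
def bUpd (rw : List Bool) (M p : Nat) : List (List Bool) → Nat → List (List Bool) :=
  fun tbl a =>
    if decide (a ≤ M) && decide (p + a < rw.length) && rw.getD (p + a) false then
      tbl.set (p + a) ((tbl.getD (p + a) []).set a true)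
    else tbl

-- `if row[s]: for a in (s-1, s, s+1): ...`
def bInner (rw : List Bool) (M p : Nat) (row : List Bool) : List (List Bool) → Nat → List (List Bool) :=
  fun tbl s =>
    if row.getD s false then [s - 1, s, s + 1].foldl (bUpd rw M p) tbl else tbl

-- one iteration of `for p in range(startIndex, n)`; the Bool is the `return True` flag
def bOuter (rw : List Bool) (M : Nat) : Bool × List (List Bool) → Nat → Bool × List (List Bool) :=
  fun acc p =>
    if acc.1 then acc
    else
      let row := acc.2.getD p []
      if row.getD 1 false then (true, acc.2)
      else (false, (List.range' 2 (M - 1)).foldl (bInner rw M p row) acc.2)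

-- Port of B. All loop indices in B are nonnegative (range(startIndex, n), range(2, maxS+1),
-- the adjusted speeds s-1,s,s+1 with s ≥ 2), so they are ported as Nat; startIndex/initSpeed
-- are nonnegative at their use sites (earlier checks returned False otherwise), so .toNat is
-- exact there. Python's `return True` inside the position loop is the done-flag of the fold's
-- accumulator; `row = reach[p]` is a snapshot, exact because the inner updates only touch
-- positions p+a with a ≥ 1 > 0. List indexing/assignment on in-range indices is getD / set.
def canStopIterative_alt (runway : List Bool) (initSpeed : Int) (startIndex : Int) : Bool :=
  if runway = [] then false
  else
    let n : Int := PySem.List.len runway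
    if startIndex ≥ n then false
    else if startIndex < 0 then false
    else if initSpeed < 0 then false
    else if initSpeed > n then false
    else if !(PySem.List.pyGetD runway startIndex false) then false
    else if initSpeed = 0 then true
    else
      let maxS : Int := bMaxS n 1
      if initSpeed > maxS then false
      else
        let M : Nat := maxS.toNat
        let reach0 : List (List Bool) :=
          (List.replicate runway.length (List.replicate (M + 1) false)).set
            startIndex.toNat ((List.replicate (M + 1) false).set initSpeed.toNat true)
        let res : Bool × List (List Bool) :=
          (List.range' startIndex.toNat (runway.length - startIndex.toNat)).foldl
            (bOuter runway M) (false, reach0)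
        res.1

-- ===== PRECONDITION & SPEC =====
def Spec_canStopIterative (runway : List Bool) (initSpeed : Int) (startIndex : Int) (out : Bool) : Prop := out = canStopIterative_alt runway initSpeed startIndex
instance (runway : List Bool) (initSpeed : Int) (startIndex : Int) (out : Bool) : Decidable (Spec_canStopIterative runway initSpeed startIndex out) := by unfold Spec_canStopIterative; infer_instance

-- ===== CLAIM (what is proved, stated in full; the proofs are below) =====
def Claim_equal_canStopIterative : Prop := ∀ (runway : List Bool) (initSpeed : Int) (startIndex : Int), Dom_canStopIterative runway initSpeed startIndex → Spec_canStopIterative runway initSpeed startIndex (canStopIterative runway initSpeed startIndex)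

-- ===== LEMMAS AND PROOFS =====

-- `stopF rw p s` : the car, standing on cell p at speed s, can eventually stop (the
-- recurrence A computes; for s = 0 it means "p is a safe cell").
def stopF (rw : List Bool) (p : Nat) : Nat → Bool
  | 0 => rw.getD p false
  | 1 =>
      (if p + 1 < rw.length then rw.getD (p + 1) false && stopF rw (p + 1) 1 else false)
      || (if p < rw.length then rw.getD p false && rw.getD p false else false)
      || (if p + 2 < rw.length then rw.getD (p + 2) false && stopF rw (p + 2) 2 else false)
  | (s + 2) =>
      (if p + (s + 2) < rw.length then rw.getD (p + (s + 2)) false && stopF rw (p + (s + 2)) (s + 2) else false)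
      || (if p + (s + 1) < rw.length then rw.getD (p + (s + 1)) false && stopF rw (p + (s + 1)) (s + 1) else false)
      || (if p + (s + 3) < rw.length then rw.getD (p + (s + 3)) false && stopF rw (p + (s + 3)) (s + 3) else false)
termination_by s => (rw.length - p, s)
decreasing_by
  all_goals first
    | exact Prod.Lex.left _ _ (by omega)


-- tri s = 0 + 1 + ... + s, the minimum distance needed to stop from speed s+1
def tri : Nat → Nat
  | 0 => 0
  | (s + 1) => tri s + (s + 1)

lemma tri_mono {s t : Nat} (h : s ≤ t) : tri s ≤ tri t := by
  induction h with
  | refl => exact le_refl _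
  | step h ih => exact le_trans ih (by simp [tri])

lemma stopF_dist (rw : List Bool) : ∀ p s, 1 ≤ s → stopF rw p s = true → p + tri (s - 1) < rw.length := by
  intro p s
  fun_induction stopF rw p s
  case case1 => omega
  case case2 p ih1 ih2 =>
    intro _ h
    rcases (by simpa using h :
        (_ ∧ _ ∧ _ ∨ _ ∧ _) ∨ _ ∧ _ ∧ _) with (⟨hg, _, hr⟩ | ⟨hg, _⟩) | ⟨hg, _, hr⟩
    · have := ih1 hg (by omega) hr; simp [tri] at *; omega
    · simp [tri]; omega
    · have := ih2 hg (by omega) hr; simp [tri] at *; omega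
  case case3 p s ih1 ih2 ih3 =>
    intro _ h
    rcases (by simpa using h :
        (_ ∧ _ ∧ _ ∨ _ ∧ _ ∧ _) ∨ _ ∧ _ ∧ _) with (⟨hg, _, hr⟩ | ⟨hg, _, hr⟩) | ⟨hg, _, hr⟩
    · have := ih1 hg (by omega) hr
      have e : s + 2 - 1 = s + 1 := by omega
      rw [e] at *; simp [tri] at *; omega
    · have := ih2 hg (by omega) hr
      have e : s + 1 - 1 = s := by omega
      have e1 : s + 2 - 1 = s + 1 := by omega
      rw [e] at this; rw [e1]; simp [tri] at *; omega
    · have := ih3 hg (by omega) hr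
      have e : s + 3 - 1 = s + 2 := by omega
      have e1 : s + 2 - 1 = s + 1 := by omega
      rw [e] at this; rw [e1]; simp [tri] at *; omega

lemma tri_cast (s : Nat) : PySem.Int.floordiv ((s : Int) * ((s : Int) + 1)) 2 = (tri s : Int) := by
  have h2 : (s : Int) * ((s : Int) + 1) = 2 * (tri s : Int) := by
    induction s with
    | zero => simp [tri]
    | succ s ih =>
      have e : ((s : Int) + 1) * (((s : Int) + 1) + 1) = (s : Int) * ((s : Int) + 1) + 2 * ((s : Int) + 1) := by
        ring
      push_cast [tri]
      push_cast at ih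
      linarith [e, ih]
  rw [PySem.Int.floordiv_eq_ediv_of_pos (by norm_num), h2, Int.mul_ediv_cancel_left _ (by norm_num)]

lemma bMaxS_spec (n : Int) : ∀ s : Int, 1 ≤ s → (tri (s.toNat - 1) : Int) ≤ n - 1 →
    1 ≤ bMaxS n s ∧ s ≤ bMaxS n s ∧ (tri ((bMaxS n s).toNat - 1) : Int) ≤ n - 1 ∧
      n - 1 < (tri (bMaxS n s).toNat : Int) := by
  intro s
  fun_induction bMaxS n s
  case case1 s h ih =>
    intro hs hle
    have hcast : ((s.toNat : Int)) = s := Int.toNat_of_nonneg (by omega)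
    have htri : (tri s.toNat : Int) ≤ n - 1 := by
      have := tri_cast s.toNat
      rw [hcast] at this
      rw [← this]; exact h
    have hnext := ih (by omega) (by
      have e : (s + 1).toNat - 1 = s.toNat := by omega
      rw [e]; exact htri)
    exact ⟨by omega, by omega, hnext.2.2.1, hnext.2.2.2⟩
  case case2 s h =>
    intro hs hle
    have hcast : ((s.toNat : Int)) = s := Int.toNat_of_nonneg (by omega)
    have htri : ¬ (tri s.toNat : Int) ≤ n - 1 := by
      have := tri_cast s.toNat
      rw [hcast] at this
      rw [← this]; exact h
    exact ⟨hs, le_refl _, hle, by omega⟩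

lemma stopF_false_of_big (rw : List Bool) (p s : Nat) (h1 : 1 ≤ s)
    (hbig : (rw.length : Int) - 1 < (tri (s - 1) : Int)) : stopF rw p s = false := by
  by_contra hc
  have hc' : stopF rw p s = true := by
    cases hx : stopF rw p s
    · exact absurd hx hc
    · rfl
  have := stopF_dist rw p s h1 hc'
  omega

-- ---------- A-side characterization ----------

-- "x is a key of memo" : x is an in-range index of a safe cell
def goodI (rw : List Bool) (x : Int) : Bool :=
  decide (0 ≤ x) && decide (x < (rw.length : Int)) && rw.getD x.toNat false

-- membership in a fully processed row of A's memo
def rowFull (rw : List Bool) (q : Nat) (a : Int) : Bool :=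
  decide (a = 0) || (decide (1 ≤ a) && decide (a ≤ (rw.length : Int)) && stopF rw q a.toNat)

def aInitStep (rw : List Bool) : PySem.Dict Int (PySem.Set Int) → Int → PySem.Dict Int (PySem.Set Int) :=
  fun memo position =>
    if PySem.List.pyGetD rw position false then
      memo.insert position (PySem.Set.ofList [0])
    else memo

lemma A_init (rw : List Bool) (m : Nat) :
    (∀ x : Int, ((List.map (fun k : Nat => (k : Int)) (List.range m)).foldl (aInitStep rw) PySem.Dict.empty).contains x
        = (decide (0 ≤ x) && decide (x < (m : Int)) && rw.getD x.toNat false)) ∧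
    (∀ q : Nat, q < m → ∀ a : Int,
      PySem.Set.contains (((List.map (fun k : Nat => (k : Int)) (List.range m)).foldl (aInitStep rw) PySem.Dict.empty).getD (q : Int) PySem.Set.empty) a
        = (rw.getD q false && decide (a = 0))) := by
  induction m with
  | zero =>
    constructor
    · intro x
      simp only [List.range_zero, List.map_nil, List.foldl_nil, PySem.Dict.contains_empty]
      by_cases h0 : 0 ≤ x
      · have : ¬ x < (0 : Int) := by omega
        simp [this]
      · simp [h0]
    · intro q hq; omega
  | succ m ih =>
    rw [List.range_succ]
    simp only [List.map_append, List.map_cons, List.map_nil, List.foldl_append, List.foldl_cons, List.foldl_nil]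
    constructor
    · intro x
      by_cases hg : rw.getD m false
      · simp only [aInitStep, PySem.List.pyGetD_natCast, hg, if_pos]
        rw [PySem.Dict.contains_insert]
        by_cases hx : x = (m : Int)
        · subst hx
          simp [hg]
          rw [← List.getD_eq_getElem?_getD]
          exact hg
        · have : (x == (m : Int)) = false := by simp [hx]
          rw [this, Bool.false_or, ih.1 x]
          by_cases h0 : 0 ≤ x
          · have hne : x.toNat ≠ m := by omega
            by_cases hlt : x < (m : Int) <;> simp [h0, hlt] <;> omega
          · simp [h0]
      · simp only [aInitStep, PySem.List.pyGetD_natCast, hg, if_neg, Bool.false_eq_true, not_false_iff]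
        rw [ih.1 x]
        by_cases h0 : 0 ≤ x
        · by_cases hx : x = (m : Int)
          · subst hx
            simp at hg
            simp [hg, Int.toNat_natCast]
          · have hne : x.toNat ≠ m ∨ ¬ 0 ≤ x := by omega
            by_cases hlt : x < (m : Int)
            · simp [h0, hlt, (by omega : x < ((m : Nat) + 1 : Int))]
            · have : ¬ x < ((m : Nat) + 1 : Int) := by omega
              simp [h0, hlt, this]
        · simp [h0]
    · intro q hq a
      by_cases hqm : q = m
      · subst hqm
        by_cases hg : rw.getD q false
        · simp only [aInitStep, PySem.List.pyGetD_natCast, hg, if_pos]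
          rw [PySem.Dict.getD_insert]
          simp [hg]
        · simp only [aInitStep, PySem.List.pyGetD_natCast, hg, Bool.false_eq_true, if_neg, not_false_iff]
          have hc := ih.1 (q : Int)
          simp only [Int.toNat_natCast] at hc
          have : ((List.map (fun k : Nat => (k : Int)) (List.range q)).foldl (aInitStep rw) PySem.Dict.empty).contains (q : Int) = false := by
            rw [hc]; simp [hg]
          rw [PySem.Dict.getD_of_not_contains _ _ this]
          simp [hg]
      · have hql : q < m := by omega
        by_cases hg : rw.getD m false
        · simp only [aInitStep, PySem.List.pyGetD_natCast, hg, if_pos]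
          rw [PySem.Dict.getD_insert]
          have : ¬ ((q : Int) = (m : Int)) := by omega
          rw [if_neg this]
          exact ih.2 q hql a
        · simp only [aInitStep, PySem.List.pyGetD_natCast, hg, Bool.false_eq_true, if_neg, not_false_iff]
          exact ih.2 q hql a

def aSpeedStep (rw : List Bool) (position : Int) :
    PySem.Dict Int (PySem.Set Int) → Int → PySem.Dict Int (PySem.Set Int) :=
  fun memo speed =>
    if [speed, speed - 1, speed + 1].any (fun adjustedSpeed =>
        memo.contains (position + adjustedSpeed) &&
        PySem.Set.contains (memo.getD (position + adjustedSpeed) PySem.Set.empty) adjustedSpeed)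
    then memo.modify position PySem.Set.empty (fun st => PySem.Set.add st speed)
    else memo

lemma goodI_nat (rw : List Bool) (r : Nat) :
    goodI rw ((r : Nat) : Int) = (decide (r < rw.length) && rw.getD r false) := by
  simp only [goodI, Int.toNat_natCast]
  have h0 : decide ((0 : Int) ≤ (r : Int)) = true := by simp
  have he : decide ((r : Int) < (rw.length : Int)) = decide (r < rw.length) := by
    by_cases h : r < rw.length
    · simp [h, (by exact_mod_cast h : (r : Int) < (rw.length : Int))]
    · simp [h, (by exact_mod_cast h : ¬ (r : Int) < (rw.length : Int))]
  rw [h0, he, Bool.true_and]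

-- value of one membership test `position+a in memo and a in memo[position+a]` for a ≥ 1,
-- when all rows strictly beyond q are fully processed
lemma A_term (rw : List Bool) (q : Nat) (memo : PySem.Dict Int (PySem.Set Int))
    (hc : ∀ x : Int, memo.contains x = goodI rw x)
    (hrow_gt : ∀ r : Nat, q < r → r < rw.length → rw.getD r false = true → ∀ a : Int,
      PySem.Set.contains (memo.getD (r : Int) PySem.Set.empty) a = rowFull rw r a)
    (a : Nat) (ha : 1 ≤ a) :
    (memo.contains ((q : Int) + (a : Int)) &&
      PySem.Set.contains (memo.getD ((q : Int) + (a : Int)) PySem.Set.empty) ((a : Int)))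
    = (decide (q + a < rw.length) && rw.getD (q + a) false && stopF rw (q + a) a) := by
  rw [hc]
  by_cases h1 : q + a < rw.length
  · by_cases h2 : rw.getD (q + a) false = true
    · have e : (q : Int) + (a : Int) = ((q + a : Nat) : Int) := by push_cast; ring
      rw [e]
      have h2' : rw[q + a]'h1 = true := by rwa [List.getD_eq_getElem rw false h1] at h2
      have hgood : goodI rw ((q + a : Nat) : Int) = true := by
        rw [goodI_nat]; simp [h1, h2']
      rw [hgood, hrow_gt (q + a) (by omega) h1 h2 ((a : Int)), rowFull]
      have ha0 : ¬ ((a : Int) = 0) := by omega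
      have ha0n : ¬ (a = 0) := by omega
      have ha1 : (1 : Int) ≤ (a : Int) := by omega
      have han : (a : Int) ≤ (rw.length : Int) := by omega
      simp [ha0, ha0n, ha1, han, Int.toNat_natCast, h1, h2']
    · have hgood : goodI rw ((q : Int) + (a : Int)) = true → False := by
        intro hgd
        simp [goodI] at hgd
        have : ((q : Int) + (a : Int)).toNat = q + a := by omega
        rw [this] at hgd
        exact h2 hgd.2
      cases hx : goodI rw ((q : Int) + (a : Int))
      · simp at h2
        simp [h2]
      · exact absurd hx hgood
  · have hgood : goodI rw ((q : Int) + (a : Int)) = false := by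
      simp [goodI]
      intro _ h
      omega
    simp [hgood, h1]

lemma A_cond (rw : List Bool) (q : Nat) (hq : q < rw.length) (hg : rw.getD q false = true)
    (memo : PySem.Dict Int (PySem.Set Int))
    (hc : ∀ x : Int, memo.contains x = goodI rw x)
    (hrow_gt : ∀ r : Nat, q < r → r < rw.length → rw.getD r false = true → ∀ a : Int,
      PySem.Set.contains (memo.getD (r : Int) PySem.Set.empty) a = rowFull rw r a)
    (hq0 : PySem.Set.contains (memo.getD (q : Int) PySem.Set.empty) 0 = true)
    (s : Nat) (hs1 : 1 ≤ s) :
    ([((s : Int)), (s : Int) - 1, (s : Int) + 1].any (fun a =>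
        memo.contains ((q : Int) + a) &&
        PySem.Set.contains (memo.getD ((q : Int) + a) PySem.Set.empty) a))
      = stopF rw q s := by
  have hifand : ∀ (c : Prop) [Decidable c] (x y : Bool),
      (if c then x && y else false) = (decide c && x && y) := by
    intro c _ x y
    by_cases h : c <;> simp [h]
  match s, hs1 with
  | 1, _ =>
    have t1 := A_term rw q memo hc hrow_gt 1 (by omega)
    have t2 := A_term rw q memo hc hrow_gt 2 (by omega)
    have t0 : (memo.contains ((q : Int) + ((1 : Int) - 1)) &&
        PySem.Set.contains (memo.getD ((q : Int) + ((1 : Int) - 1)) PySem.Set.empty) ((1 : Int) - 1)) = true := by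
      have e : (q : Int) + ((1 : Int) - 1) = (q : Int) := by ring
      rw [e]
      have hg' : rw[q]'hq = true := by rwa [List.getD_eq_getElem rw false hq] at hg
      have hh : goodI rw (q : Int) = true := by
        rw [goodI_nat]; simp [hq, hg']
      rw [hc, hh]
      simpa using hq0
    simp only [List.any_cons, List.any_nil, Bool.or_false, Nat.cast_one]
    simp only [Nat.cast_one] at t0
    rw [t0]
    rw [stopF]
    have hg' : rw[q]'hq = true := by rwa [List.getD_eq_getElem rw false hq] at hg
    simp [hq, hg']
  | (u + 2), _ =>
    have t1 := A_term rw q memo hc hrow_gt (u + 2) (by omega)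
    have t2 := A_term rw q memo hc hrow_gt (u + 1) (by omega)
    have t3 := A_term rw q memo hc hrow_gt (u + 3) (by omega)
    have e2 : ((u + 2 : Nat) : Int) - 1 = ((u + 1 : Nat) : Int) := by push_cast; ring
    have e3 : ((u + 2 : Nat) : Int) + 1 = ((u + 3 : Nat) : Int) := by push_cast; ring
    simp only [List.any_cons, List.any_nil, Bool.or_false, e2, e3]
    conv_rhs => rw [stopF]
    rw [hifand, hifand, hifand]
    rw [t1, t2, t3]
    simp only [← Nat.add_assoc, Bool.or_assoc]

lemma A_inner (rw : List Bool) (q : Nat) (hq : q < rw.length) (hg : rw.getD q false = true)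
    (memo : PySem.Dict Int (PySem.Set Int))
    (hc : ∀ x : Int, memo.contains x = goodI rw x)
    (hrow : ∀ r : Nat, r < rw.length → rw.getD r false = true → ∀ a : Int,
      PySem.Set.contains (memo.getD (r : Int) PySem.Set.empty) a =
        if q < r then rowFull rw r a else decide (a = 0)) :
    ∀ t : Nat,
    (∀ x : Int, ((PySem.List.pyRange 1 ((t : Int) + 1) 1).foldl (aSpeedStep rw (q : Int)) memo).contains x = goodI rw x) ∧
    (∀ r : Nat, r < rw.length → rw.getD r false = true → ∀ a : Int,
      PySem.Set.contains (((PySem.List.pyRange 1 ((t : Int) + 1) 1).foldl (aSpeedStep rw (q : Int)) memo).getD (r : Int) PySem.Set.empty) a =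
        if q < r then rowFull rw r a
        else if r = q then (decide (a = 0) || (decide (1 ≤ a) && decide (a ≤ (t : Int)) && stopF rw r a.toNat))
        else decide (a = 0)) := by
  intro t
  induction t with
  | zero =>
    rw [PySem.List.pyRange_one_eq_nil (by norm_num)]
    simp only [List.foldl_nil]
    refine ⟨hc, ?_⟩
    intro r hr hgr a
    rw [hrow r hr hgr a]
    by_cases h1 : q < r
    · simp [h1]
    · by_cases h2 : r = q
      · by_cases ha : a = 0
        · simp [h1, h2, ha]
        · by_cases hle : (1 : Int) ≤ a
          · simp [h1, h2, ha, hle]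
            intro h'
            exact absurd h' (by omega)
          · simp [h1, h2, ha, hle]
      · simp [h1, h2]
  | succ t ih =>
    have hsplit : PySem.List.pyRange 1 (((t + 1 : Nat) : Int) + 1) 1
        = PySem.List.pyRange 1 ((t : Int) + 1) 1 ++ [((t + 1 : Nat) : Int)] := by
      have e : ((t + 1 : Nat) : Int) + 1 = ((t : Int) + 1) + 1 := by push_cast; ring
      rw [e, PySem.List.pyRange_one_succ_right (by omega)]
      have els : ([(t : Int) + 1] : List Int) = [((t + 1 : Nat) : Int)] := by
        push_cast; ring_nf
      rw [els]
    rw [hsplit, List.foldl_append, List.foldl_cons, List.foldl_nil]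
    set memoT := (PySem.List.pyRange 1 ((t : Int) + 1) 1).foldl (aSpeedStep rw (q : Int)) memo with hmemoT
    obtain ⟨ihc, ihrow⟩ := ih
    have hq0T : PySem.Set.contains (memoT.getD (q : Int) PySem.Set.empty) 0 = true := by
      rw [ihrow q hq hg 0]
      simp
    have hrow_gtT : ∀ r : Nat, q < r → r < rw.length → rw.getD r false = true → ∀ a : Int,
        PySem.Set.contains (memoT.getD (r : Int) PySem.Set.empty) a = rowFull rw r a := by
      intro r h1 h2 h3 a
      rw [ihrow r h2 h3 a, if_pos h1]
    have hcond := A_cond rw q hq hg memoT ihc hrow_gtT hq0T (t + 1) (by omega)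
    by_cases hstop : stopF rw q (t + 1) = true
    · rw [aSpeedStep]
      simp only [hstop] at hcond
      rw [if_pos hcond]
      constructor
      · intro x
        rw [PySem.Dict.contains_modify, ihc x]
        by_cases hx : x = (q : Int)
        · subst hx
          rw [goodI_nat]
          have hg' : rw[q]'hq = true := by rwa [List.getD_eq_getElem rw false hq] at hg
          simp [hq, hg']
        · simp [hx]
      · intro r hr hgr a
        rw [PySem.Dict.getD_modify]
        by_cases hrq : (r : Int) = (q : Int)
        · have hr' : r = q := by omega
          rw [if_pos hrq]
          subst hr'
          have hmem : PySem.Set.contains ((memoT.getD (r : Int) PySem.Set.empty).add ((t + 1 : Nat) : Int)) a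
              = (PySem.Set.contains (memoT.getD (r : Int) PySem.Set.empty) a || decide (a = (t : Int) + 1)) := by
            by_cases h1 : a ∈ (memoT.getD (r : Int) PySem.Set.empty)
            · simp [pysem, PySem.Set.mem_add, h1]
            · simp [pysem, PySem.Set.mem_add, h1]
          rw [hmem, ihrow r hr hgr a]
          rw [if_neg (by omega), if_pos rfl, if_neg (by omega), if_pos rfl]
          by_cases ha : a = (t : Int) + 1
          · subst ha
            have h3 : (((t : Int) + 1)).toNat = t + 1 := by omega
            simp [h3, hstop, (by omega : (1 : Int) ≤ (t : Int) + 1),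
              (by omega : ¬ ((t : Int) + 1 = 0)), (by omega : ¬ ((t : Int) + 1 ≤ (t : Int)))]
          · have he : (decide (a ≤ ((t : Nat) : Int))) = (decide (a ≤ (t : Int) + 1)) := by
              by_cases hle : a ≤ ((t : Nat) : Int)
              · simp [hle, (by omega : a ≤ (t : Int) + 1)]
              · simp [hle]
                omega
            rw [he]
            simp [ha]
        · rw [if_neg hrq, ihrow r hr hgr a]
          have : ¬ (r = q) := by omega
          by_cases h1 : q < r
          · simp [h1]
          · simp [h1, this]
    · rw [aSpeedStep]
      have hcond' : ([((t + 1 : Nat) : Int), ((t + 1 : Nat) : Int) - 1, ((t + 1 : Nat) : Int) + 1].any (fun a =>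
          memoT.contains ((q : Int) + a) &&
          PySem.Set.contains (memoT.getD ((q : Int) + a) PySem.Set.empty) a)) = false := by
        rw [hcond]
        cases hx : stopF rw q (t + 1)
        · rfl
        · exact absurd hx hstop
      rw [if_neg (by rw [hcond']; exact Bool.false_ne_true)]
      refine ⟨ihc, ?_⟩
      intro r hr hgr a
      rw [ihrow r hr hgr a]
      by_cases h1 : q < r
      · simp [h1]
      · by_cases h2 : r = q
        · subst h2
          rw [if_neg h1, if_pos rfl, if_neg h1, if_pos rfl]
          by_cases ha : a = (t : Int) + 1
          · subst ha
            have h3 : (((t : Int) + 1)).toNat = t + 1 := by omega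
            have hf : stopF rw r (t + 1) = false := by
              cases hx : stopF rw r (t + 1)
              · rfl
              · exact absurd hx hstop
            simp [h3, hf, (by omega : ¬ ((t : Int) + 1 ≤ (t : Int)))]
          · have he : (decide (a ≤ ((t : Nat) : Int))) = (decide (a ≤ (t : Int) + 1)) := by
              by_cases hle : a ≤ ((t : Nat) : Int)
              · simp [hle, (by omega : a ≤ (t : Int) + 1)]
              · simp [hle]
                omega
            rw [he]
            push_cast
            rfl
        · simp [h1, h2]

def aOuterStep (rw : List Bool) : PySem.Dict Int (PySem.Set Int) → Int → PySem.Dict Int (PySem.Set Int) :=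
  fun memo position =>
    if !(PySem.List.pyGetD rw position false) then memo
    else
      (PySem.List.pyRange 1 ((PySem.List.len rw) + 1) 1).foldl (aSpeedStep rw position) memo

lemma A_outer (rw : List Bool) : ∀ m : Nat, m ≤ rw.length → ∀ memo : PySem.Dict Int (PySem.Set Int),
    (∀ x : Int, memo.contains x = goodI rw x) →
    (∀ r : Nat, r < rw.length → rw.getD r false = true → ∀ a : Int,
      PySem.Set.contains (memo.getD (r : Int) PySem.Set.empty) a =
        if m ≤ r then rowFull rw r a else decide (a = 0)) →
    (∀ x : Int, (((List.map (fun k : Nat => (k : Int)) (List.range m)).reverse).foldl (aOuterStep rw) memo).contains x = goodI rw x) ∧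
    (∀ r : Nat, r < rw.length → rw.getD r false = true → ∀ a : Int,
      PySem.Set.contains ((((List.map (fun k : Nat => (k : Int)) (List.range m)).reverse).foldl (aOuterStep rw) memo).getD (r : Int) PySem.Set.empty) a
        = rowFull rw r a) := by
  intro m
  induction m with
  | zero =>
    intro _ memo hc hrow
    simp only [List.range_zero, List.map_nil, List.reverse_nil, List.foldl_nil]
    refine ⟨hc, ?_⟩
    intro r hr hgr a
    rw [hrow r hr hgr a, if_pos (by omega)]
  | succ m ih =>
    intro hm memo hc hrow
    have hsplit : ((List.map (fun k : Nat => (k : Int)) (List.range (m + 1))).reverse)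
        = (m : Int) :: (List.map (fun k : Nat => (k : Int)) (List.range m)).reverse := by
      rw [List.range_succ]
      simp
    rw [hsplit, List.foldl_cons]
    by_cases hgm : rw.getD m false = true
    · have hrow' : ∀ r : Nat, r < rw.length → rw.getD r false = true → ∀ a : Int,
          PySem.Set.contains (memo.getD (r : Int) PySem.Set.empty) a =
            if m < r then rowFull rw r a else decide (a = 0) := by
        intro r hr hgr a
        rw [hrow r hr hgr a]
        by_cases h1 : m < r
        · rw [if_pos h1, if_pos (by omega)]
        · rw [if_neg h1, if_neg (by omega)]
      have hinner := A_inner rw m (by omega) hgm memo hc hrow' rw.length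
      have hstep : aOuterStep rw memo (m : Int)
          = (PySem.List.pyRange 1 ((rw.length : Int) + 1) 1).foldl (aSpeedStep rw (m : Int)) memo := by
        rw [aOuterStep]
        have : PySem.List.pyGetD rw ((m : Nat) : Int) false = true := by
          rw [PySem.List.pyGetD_natCast]; exact hgm
        rw [this]
        simp [PySem.List.len_eq]
      rw [hstep]
      apply ih (by omega)
      · exact hinner.1
      · intro r hr hgr a
        rw [hinner.2 r hr hgr a]
        by_cases h1 : m < r
        · rw [if_pos h1, if_pos (by omega)]
        · by_cases h2 : r = m
          · subst h2
            rw [if_neg h1, if_pos rfl, if_pos (by omega)]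
            rfl
          · rw [if_neg h1, if_neg h2, if_neg (by omega)]
    · have hstep : aOuterStep rw memo (m : Int) = memo := by
        rw [aOuterStep]
        have : PySem.List.pyGetD rw ((m : Nat) : Int) false = false := by
          rw [PySem.List.pyGetD_natCast]
          cases hx : rw.getD m false
          · rfl
          · exact absurd hx hgm
        rw [this]
        rfl
      rw [hstep]
      apply ih (by omega) memo hc
      intro r hr hgr a
      rw [hrow r hr hgr a]
      by_cases h1 : m ≤ r
      · have : r ≠ m := by
          intro h
          rw [h] at hgr
          exact hgm hgr
        rw [if_pos (by omega), if_pos h1]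
      · rw [if_neg (by omega), if_neg h1]

lemma A_char (rw : List Bool) (v i : Int) (hne : rw ≠ []) (hi0 : 0 ≤ i) (hilt : i < (rw.length : Int))
    (hv0 : 0 ≤ v) (hvn : v ≤ (rw.length : Int)) (hgood : rw.getD i.toNat false = true) :
    canStopIterative rw v i = rowFull rw i.toNat v := by
  rw [canStopIterative]
  rw [check_input, if_neg hne]
  simp only [Bool.not_true, Bool.false_eq_true, if_false]
  rw [if_neg (by simp [PySem.List.len_eq]; omega)]
  rw [if_neg (by omega)]
  rw [if_neg (by omega)]
  rw [if_neg (by simp [PySem.List.len_eq]; omega)]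
  have hget : PySem.List.pyGetD rw i false = true := by
    rw [PySem.List.pyGetD_of_nonneg rw false hi0]
    exact hgood
  rw [hget]
  simp only [Bool.not_true, Bool.false_eq_true, if_false]
  show PySem.Set.contains
      ((((PySem.List.pyRange 0 (PySem.List.len rw) 1).reverse.foldl (aOuterStep rw)
          ((PySem.List.pyRange 0 (PySem.List.len rw) 1).foldl (aInitStep rw) PySem.Dict.empty))).getD i PySem.Set.empty) v
    = rowFull rw i.toNat v
  have hlen : PySem.List.len rw = ((rw.length : Nat) : Int) := PySem.List.len_eq rw
  rw [hlen, PySem.List.pyRange_zero_nat]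
  have hinit := A_init rw rw.length
  have houter := A_outer rw rw.length (le_refl _)
      ((List.map (fun k : Nat => (k : Int)) (List.range rw.length)).foldl (aInitStep rw) PySem.Dict.empty)
      (by
        intro x
        rw [hinit.1 x]
        rfl)
      (by
        intro r hr hgr a
        rw [hinit.2 r hr a, hgr, if_neg (by omega)]
        simp)
  have hi' : i = ((i.toNat : Nat) : Int) := by omega
  rw [hi']
  rw [houter.2 i.toNat (by omega) hgood v]
  rw [Int.toNat_natCast]

-- ---------- B-side characterization ----------

lemma getD_set_self (l : List (List Bool)) (i : Nat) (x : List Bool) (h : i < l.length) :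
    (l.set i x).getD i [] = x := by
  simp [List.getD_eq_getElem?_getD, h]

lemma getD_set_ne (l : List (List Bool)) (i j : Nat) (x : List Bool) (h : j ≠ i) :
    (l.set i x).getD j [] = l.getD j [] := by
  rw [List.getD_eq_getElem?_getD, List.getD_eq_getElem?_getD, List.getElem?_set]
  rw [if_neg (fun hij => h hij.symm)]

lemma getD_set_self_bool (l : List Bool) (i : Nat) (x : Bool) (h : i < l.length) :
    (l.set i x).getD i false = x := by
  simp [List.getD_eq_getElem?_getD, h]

lemma getD_set_ne_bool (l : List Bool) (i j : Nat) (x : Bool) (h : j ≠ i) :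
    (l.set i x).getD j false = l.getD j false := by
  rw [List.getD_eq_getElem?_getD, List.getD_eq_getElem?_getD, List.getElem?_set]
  rw [if_neg (fun hij => h hij.symm)]

-- `ReachB rw M i v b q a` : the state (position q, speed a) is reachable from the start
-- state (i, v) using forward moves whose SOURCE positions are all < b (the positions B
-- has already processed); a move from (p, s), 2 ≤ s ≤ M, reaches (p+a, a) for
-- a ∈ {s-1, s, s+1} with a ≤ M, p+a in range and safe.
inductive ReachB (rw : List Bool) (M : Nat) (i v : Nat) (b : Nat) : Nat → Nat → Prop
  | base : ReachB rw M i v b i v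
  | step (p s a : Nat) : ReachB rw M i v b p s → p < b → 2 ≤ s → s ≤ M →
      (a + 1 = s ∨ a = s ∨ a = s + 1) → a ≤ M → p + a < rw.length →
      rw.getD (p + a) false = true → ReachB rw M i v b (p + a) a

lemma stopF_gt (rw : List Bool) (M : Nat) (hMn : (rw.length : Int) - 1 < (tri M : Int)) :
    ∀ p s : Nat, M < s → stopF rw p s = false := by
  intro p s h
  apply stopF_false_of_big rw p s (by omega)
  have := tri_mono (show M ≤ s - 1 by omega)
  have : (tri M : Int) ≤ (tri (s - 1) : Int) := by exact_mod_cast this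
  omega

lemma stopF_one (rw : List Bool) (p : Nat) (hp : p < rw.length) (hg : rw.getD p false = true) :
    stopF rw p 1 = true := by
  rw [stopF]
  have hg' : rw[p]'hp = true := by rwa [List.getD_eq_getElem rw false hp] at hg
  simp [hp, hg']

-- basic facts about reachable states
lemma reachB_facts (rw : List Bool) (M i v b : Nat)
    (hi : i < rw.length) (hgi : rw.getD i false = true) (hv1 : 1 ≤ v) (hvM : v ≤ M) :
    ∀ q a, ReachB rw M i v b q a → i ≤ q ∧ q < rw.length ∧ 1 ≤ a ∧ a ≤ M ∧ rw.getD q false = true := by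
  intro q a h
  induction h with
  | base => exact ⟨le_refl _, hi, hv1, hvM, hgi⟩
  | step p s a _ _ hs2 _ _ haM hlt hgt ih =>
    exact ⟨by omega, hlt, by omega, haM, hgt⟩

-- monotonicity in the source bound
lemma reachB_mono (rw : List Bool) (M i v : Nat) {b b' : Nat} (hb : b ≤ b') :
    ∀ q a, ReachB rw M i v b q a → ReachB rw M i v b' q a := by
  intro q a h
  induction h with
  | base => exact ReachB.base
  | step p s a _ hpb hs2 hsM hadj haM hlt hgt ih =>
    exact ReachB.step p s a ih (by omega) hs2 hsM hadj haM hlt hgt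

-- every source of a derivation lies strictly below the target position
lemma reachB_shrink (rw : List Bool) (M i v b : Nat) :
    ∀ q a, ReachB rw M i v b q a → ∀ c, q ≤ c → ReachB rw M i v c q a := by
  intro q a h
  induction h with
  | base => intro c _; exact ReachB.base
  | step p s a _ hpb hs2 hsM hadj haM hlt hgt ih =>
    intro c hc
    exact ReachB.step p s a (ih (c) (by omega)) (by omega) hs2 hsM hadj haM hlt hgt

-- with bound i (nothing processed) only the start state is reachable
lemma reachB_start (rw : List Bool) (M i v : Nat)
    (hi : i < rw.length) (hgi : rw.getD i false = true) (hv1 : 1 ≤ v) (hvM : v ≤ M) :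
    ∀ q a, ReachB rw M i v i q a → q = i ∧ a = v := by
  intro q a h
  cases h with
  | base => exact ⟨rfl, rfl⟩
  | step p s a hp hpb hs2 hsM hadj haM hlt hgt =>
    have := (reachB_facts rw M i v i hi hgi hv1 hvM p s hp).1
    omega

-- decomposition of reachability when the bound grows by one
lemma reachB_succ (rw : List Bool) (M i v b : Nat)
    (hi : i < rw.length) (hgi : rw.getD i false = true) (hv1 : 1 ≤ v) (hvM : v ≤ M) :
    ∀ q a, ReachB rw M i v (b + 1) q a ↔
      (ReachB rw M i v b q a ∨
        ∃ s, ReachB rw M i v b b s ∧ 2 ≤ s ∧ s ≤ M ∧ (a + 1 = s ∨ a = s ∨ a = s + 1) ∧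
          a ≤ M ∧ q = b + a ∧ q < rw.length ∧ rw.getD q false = true) := by
  intro q a
  constructor
  · intro h
    induction h with
    | base => exact Or.inl ReachB.base
    | step p s a hp hpb hs2 hsM hadj haM hlt hgt ih =>
      by_cases hpb' : p < b
      · rcases ih with h' | ⟨s', hs', _, _, _, _, hq', _, _⟩
        · exact Or.inl (ReachB.step p s a h' hpb' hs2 hsM hadj haM hlt hgt)
        · -- p = b + a' with a' ≥ 1 contradicts p < b
          have := (reachB_facts rw M i v (b+1) hi hgi hv1 hvM p s hp)
          exfalso
          -- hq' : p = b + a'' with that a'' ≥ 1; derive contradiction by position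
          -- actually a'' ≥ 1 is from the existential; reconstruct:
          omega
      · have hpeq : p = b := by omega
        subst hpeq
        have hsrc : ReachB rw M i v p p s := reachB_shrink rw M i v (p+1) p s hp p (le_refl _)
        exact Or.inr ⟨s, reachB_mono rw M i v (by omega) p s hsrc, hs2, hsM, hadj, haM, rfl, hlt, hgt⟩
  · intro h
    rcases h with h | ⟨s, hs, hs2, hsM, hadj, haM, hq, hlt, hgt⟩
    · exact reachB_mono rw M i v (by omega) q a h
    · subst hq
      exact ReachB.step b s a (reachB_mono rw M i v (by omega) b s hs) (by omega) hs2 hsM hadj haM hlt hgt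

-- (forward) if a reachable state can stop, some state with speed 1 is reachable
lemma reach_to_one (rw : List Bool) (M i v : Nat)
    (hi : i < rw.length) (hgi : rw.getD i false = true) (hv1 : 1 ≤ v) (hvM : v ≤ M)
    (hMn : (rw.length : Int) - 1 < (tri M : Int)) :
    ∀ p s, 1 ≤ s → ReachB rw M i v rw.length p s → stopF rw p s = true →
      ∃ q, ReachB rw M i v rw.length q 1 := by
  intro p s
  fun_induction stopF rw p s
  case case1 =>
    intro h1 _ _
    exact absurd h1 (by omega)
  case case2 p ih1 ih2 =>
    intro _ hr _
    exact ⟨p, hr⟩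
  case case3 p u ih1 ih2 ih3 =>
    intro _ hr h
    have hfacts := reachB_facts rw M i v rw.length hi hgi hv1 hvM p (u + 2) hr
    have hsM : u + 2 ≤ M := hfacts.2.2.2.1
    have hpn : p < rw.length := hfacts.2.1
    rcases (by simpa using h :
        (_ ∧ _ ∧ _ ∨ _ ∧ _ ∧ _) ∨ _ ∧ _ ∧ _) with (⟨hg, hs, hrec⟩ | ⟨hg, hs, hrec⟩) | ⟨hg, hs, hrec⟩
    · have hstep : ReachB rw M i v rw.length (p + (u + 2)) (u + 2) :=
        ReachB.step p (u + 2) (u + 2) hr hpn (by omega) hsM (Or.inr (Or.inl rfl)) hsM hg hs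
      exact ih1 hg (by omega) hstep hrec
    · have hstep : ReachB rw M i v rw.length (p + (u + 1)) (u + 1) :=
        ReachB.step p (u + 2) (u + 1) hr hpn (by omega) hsM (Or.inl (by omega)) (by omega) hg hs
      exact ih2 hg (by omega) hstep hrec
    · have haM : u + 3 ≤ M := by
        by_contra hx
        rw [stopF_gt rw M hMn _ _ (by omega)] at hrec
        exact Bool.false_ne_true hrec
      have hstep : ReachB rw M i v rw.length (p + (u + 3)) (u + 3) :=
        ReachB.step p (u + 2) (u + 3) hr hpn (by omega) hsM (Or.inr (Or.inr rfl)) haM hg hs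
      exact ih3 hg (by omega) hstep hrec

-- one move of the recurrence, read backwards
lemma stopF_step (rw : List Bool) (p u a : Nat)
    (hadj : a + 1 = u + 2 ∨ a = u + 2 ∨ a = u + 3)
    (hlt : p + a < rw.length) (hg : rw.getD (p + a) false = true)
    (hstop : stopF rw (p + a) a = true) :
    stopF rw p (u + 2) = true := by
  rw [stopF]
  rcases hadj with h | h | h
  · have ha : a = u + 1 := by omega
    subst ha
    rw [if_pos hlt, hg, hstop]
    simp
  · subst h
    rw [if_pos hlt, hg, hstop]
    simp
  · subst h
    rw [if_pos hlt, hg, hstop]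
    simp

-- (backward) if a reachable state can stop, the start state can stop
lemma stopF_of_reach (rw : List Bool) (M i v : Nat) :
    ∀ q a, ReachB rw M i v rw.length q a → stopF rw q a = true → stopF rw i v = true := by
  intro q a h
  induction h with
  | base => exact fun h => h
  | step p s a _ hpb hs2 hsM hadj haM hlt hgt ih =>
    intro hstop
    apply ih
    obtain ⟨u, rfl⟩ : ∃ u, s = u + 2 := ⟨s - 2, by omega⟩
    exact stopF_step rw p u a hadj hlt hgt hstop

lemma stop_iff_reach_one (rw : List Bool) (M i v : Nat)
    (hi : i < rw.length) (hgi : rw.getD i false = true) (hv1 : 1 ≤ v) (hvM : v ≤ M)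
    (hMn : (rw.length : Int) - 1 < (tri M : Int)) :
    stopF rw i v = true ↔ ∃ q, ReachB rw M i v rw.length q 1 := by
  constructor
  · intro h
    exact reach_to_one rw M i v hi hgi hv1 hvM hMn i v hv1 ReachB.base h
  · rintro ⟨q, hq⟩
    have hf := reachB_facts rw M i v rw.length hi hgi hv1 hvM q 1 hq
    exact stopF_of_reach rw M i v q 1 hq (stopF_one rw q hf.2.1 hf.2.2.2.2)

-- ---------- the table computed by B ----------

lemma bUpd_len (rw : List Bool) (M p : Nat) (tbl : List (List Bool)) (a : Nat) :
    (bUpd rw M p tbl a).length = tbl.length := by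
  unfold bUpd
  split_ifs
  · exact List.length_set ..
  · rfl

lemma bUpd_rows (rw : List Bool) (M p : Nat) (tbl : List (List Bool)) (a : Nat)
    (hlen : tbl.length = rw.length)
    (hrows : ∀ r, r < rw.length → (tbl.getD r []).length = M + 1) :
    ∀ r, r < rw.length → ((bUpd rw M p tbl a).getD r []).length = M + 1 := by
  intro r hr
  unfold bUpd
  split_ifs with hc
  · simp only [Bool.and_eq_true, decide_eq_true_eq] at hc
    by_cases hrq : r = p + a
    · subst hrq
      rw [getD_set_self _ _ _ (by omega), List.length_set]
      exact hrows _ hr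
    · rw [getD_set_ne _ _ _ _ hrq]
      exact hrows r hr
  · exact hrows r hr

lemma bUpd_getD (rw : List Bool) (M p : Nat) (tbl : List (List Bool)) (a q c : Nat)
    (hlen : tbl.length = rw.length)
    (hrows : ∀ r, r < rw.length → (tbl.getD r []).length = M + 1) :
    (((bUpd rw M p tbl a).getD q []).getD c false = true) ↔
      (((tbl.getD q []).getD c false = true) ∨
        (a ≤ M ∧ p + a < rw.length ∧ rw.getD (p + a) false = true ∧ q = p + a ∧ c = a)) := by
  unfold bUpd
  split_ifs with hc
  · simp only [Bool.and_eq_true, decide_eq_true_eq] at hc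
    obtain ⟨⟨haM, hlt⟩, hgt⟩ := hc
    by_cases hq : q = p + a
    · subst hq
      rw [getD_set_self _ _ _ (by omega)]
      by_cases hca : c = a
      · subst hca
        rw [getD_set_self_bool _ _ _ (by rw [hrows _ hlt]; omega)]
        constructor
        · intro _
          exact Or.inr ⟨haM, hlt, hgt, rfl, rfl⟩
        · intro _
          rfl
      · rw [getD_set_ne_bool _ _ _ _ hca]
        constructor
        · exact Or.inl
        · rintro (h | ⟨_, _, _, _, h⟩)
          · exact h
          · exact absurd h hca
    · rw [getD_set_ne _ _ _ _ hq]
      constructor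
      · exact Or.inl
      · rintro (h | ⟨_, _, _, h, _⟩)
        · exact h
        · exact absurd h hq
  · constructor
    · exact Or.inl
    · rintro (h | ⟨h1, h2, h3, _, _⟩)
      · exact h
      · exact absurd (by rw [h3]; simp [h1, h2]) hc

lemma bInner_len (rw : List Bool) (M p : Nat) (row : List Bool) (tbl : List (List Bool)) (s : Nat) :
    (bInner rw M p row tbl s).length = tbl.length := by
  unfold bInner
  split_ifs
  · simp only [List.foldl_cons, List.foldl_nil, bUpd_len]
  · rfl

lemma bInner_rows (rw : List Bool) (M p : Nat) (row : List Bool) (tbl : List (List Bool)) (s : Nat)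
    (hlen : tbl.length = rw.length)
    (hrows : ∀ r, r < rw.length → (tbl.getD r []).length = M + 1) :
    ∀ r, r < rw.length → ((bInner rw M p row tbl s).getD r []).length = M + 1 := by
  unfold bInner
  split_ifs
  · simp only [List.foldl_cons, List.foldl_nil]
    exact bUpd_rows rw M p _ _ (by rw [bUpd_len, bUpd_len, hlen])
      (bUpd_rows rw M p _ _ (by rw [bUpd_len, hlen]) (bUpd_rows rw M p _ _ hlen hrows))
  · exact hrows

lemma bInner_getD (rw : List Bool) (M p : Nat) (row : List Bool) (tbl : List (List Bool)) (s q c : Nat)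
    (hs : 2 ≤ s)
    (hlen : tbl.length = rw.length)
    (hrows : ∀ r, r < rw.length → (tbl.getD r []).length = M + 1) :
    (((bInner rw M p row tbl s).getD q []).getD c false = true) ↔
      (((tbl.getD q []).getD c false = true) ∨
        (row.getD s false = true ∧ (c + 1 = s ∨ c = s ∨ c = s + 1) ∧ c ≤ M ∧
          p + c < rw.length ∧ rw.getD (p + c) false = true ∧ q = p + c)) := by
  unfold bInner
  split_ifs with hrow
  · simp only [List.foldl_cons, List.foldl_nil]
    have hl1 : (bUpd rw M p tbl (s - 1)).length = rw.length := by rw [bUpd_len, hlen]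
    have hr1 := bUpd_rows rw M p tbl (s - 1) hlen hrows
    have hl2 : (bUpd rw M p (bUpd rw M p tbl (s - 1)) s).length = rw.length := by
      rw [bUpd_len, hl1]
    have hr2 := bUpd_rows rw M p (bUpd rw M p tbl (s - 1)) s hl1 hr1
    rw [bUpd_getD rw M p _ (s + 1) q c hl2 hr2,
        bUpd_getD rw M p _ s q c hl1 hr1,
        bUpd_getD rw M p tbl (s - 1) q c hlen hrows]
    constructor
    · rintro (((h | ⟨h1, h2, h3, h4, h5⟩) | ⟨h1, h2, h3, h4, h5⟩) | ⟨h1, h2, h3, h4, h5⟩)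
      · exact Or.inl h
      · subst h5
        exact Or.inr ⟨hrow, Or.inl (by omega), h1, h2, h3, h4⟩
      · subst h5
        exact Or.inr ⟨hrow, Or.inr (Or.inl rfl), h1, h2, h3, h4⟩
      · subst h5
        exact Or.inr ⟨hrow, Or.inr (Or.inr rfl), h1, h2, h3, h4⟩
    · rintro (h | ⟨_, hadj, hM, hlt, hgt, hq⟩)
      · exact Or.inl (Or.inl (Or.inl h))
      · rcases hadj with h | h | h
        · have hce : c = s - 1 := by omega
          subst hce
          exact Or.inl (Or.inl (Or.inr ⟨hM, hlt, hgt, hq, rfl⟩))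
        · subst h
          exact Or.inl (Or.inr ⟨hM, hlt, hgt, hq, rfl⟩)
        · subst h
          exact Or.inr ⟨hM, hlt, hgt, hq, rfl⟩
  · have hrow' : row.getD s false = false := by
      cases hx : row.getD s false
      · rfl
      · exact absurd hx hrow
    constructor
    · exact Or.inl
    · rintro (h | ⟨h1, _⟩)
      · exact h
      · rw [hrow'] at h1
        exact absurd h1 Bool.false_ne_true

-- the whole speed loop of one position
lemma bInnerFold (rw : List Bool) (M i v p : Nat)
    (tbl row : _)
    (hlen : tbl.length = rw.length)
    (hrows : ∀ r, r < rw.length → (tbl.getD r []).length = M + 1)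
    (hrowc : ∀ s, (row.getD s false = true) ↔ ReachB rw M i v p p s)
    (htblc : ∀ q a, ((tbl.getD q []).getD a false = true) ↔ ReachB rw M i v p q a) :
    ∀ u : Nat,
      ((List.range' 2 u).foldl (bInner rw M p row) tbl).length = rw.length ∧
      (∀ r, r < rw.length → (((List.range' 2 u).foldl (bInner rw M p row) tbl).getD r []).length = M + 1) ∧
      (∀ q a, ((((List.range' 2 u).foldl (bInner rw M p row) tbl).getD q []).getD a false = true) ↔
        (ReachB rw M i v p q a ∨
          ∃ s, ReachB rw M i v p p s ∧ 2 ≤ s ∧ s < 2 + u ∧ (a + 1 = s ∨ a = s ∨ a = s + 1) ∧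
            a ≤ M ∧ p + a < rw.length ∧ rw.getD (p + a) false = true ∧ q = p + a)) := by
  intro u
  induction u with
  | zero =>
    simp only [List.range'_zero, List.foldl_nil]
    refine ⟨hlen, hrows, ?_⟩
    intro q a
    rw [htblc q a]
    constructor
    · exact Or.inl
    · rintro (h | ⟨s, _, _, hlt2, _⟩)
      · exact h
      · omega
  | succ u ih =>
    have hsplit : List.range' 2 (u + 1) = List.range' 2 u ++ [2 + u] := by
      have := List.range'_concat (s := 2) (n := u) (step := 1)
      simpa [Nat.add_comm] using this
    rw [hsplit, List.foldl_append, List.foldl_cons, List.foldl_nil]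
    obtain ⟨ihl, ihr, ihc⟩ := ih
    refine ⟨by rw [bInner_len, ihl], bInner_rows rw M p row _ _ ihl ihr, ?_⟩
    intro q a
    rw [bInner_getD rw M p row _ (2 + u) q a (by omega) ihl ihr, ihc q a, hrowc (2 + u)]
    constructor
    · rintro ((h | ⟨s, h1, h2, h3, h4, h5, h6, h7, h8⟩) | ⟨h1, h2, h3, h4, h5, h6⟩)
      · exact Or.inl h
      · exact Or.inr ⟨s, h1, h2, by omega, h4, h5, h6, h7, h8⟩
      · exact Or.inr ⟨2 + u, h1, by omega, by omega, h2, h3, h4, h5, h6⟩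
    · rintro (h | ⟨s, h1, h2, h3, h4, h5, h6, h7, h8⟩)
      · exact Or.inl (Or.inl h)
      · by_cases hse : s = 2 + u
        · subst hse
          exact Or.inr ⟨h1, h4, h5, h6, h7, h8⟩
        · exact Or.inl (Or.inr ⟨s, h1, h2, by omega, h4, h5, h6, h7, h8⟩)

-- the position loop, with the `return True` flag as part of the accumulator
lemma bOuterFold (rw : List Bool) (M i v : Nat)
    (hi : i < rw.length) (hgi : rw.getD i false = true) (hv1 : 1 ≤ v) (hvM : v ≤ M)
    (hM1 : 1 ≤ M) :
    ∀ (len p0 : Nat), p0 + len ≤ rw.length → ∀ acc : Bool × List (List Bool),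
    acc.2.length = rw.length →
    (∀ r, r < rw.length → ((acc.2.getD r []).length = M + 1)) →
    (acc.1 = true → ∃ q, ReachB rw M i v rw.length q 1) →
    (acc.1 = false →
      (∀ q a, ((acc.2.getD q []).getD a false = true) ↔ ReachB rw M i v p0 q a) ∧
      (∀ q, q < p0 → ¬ ReachB rw M i v rw.length q 1)) →
    ((((List.range' p0 len).foldl (bOuter rw M) acc).1 = true → ∃ q, ReachB rw M i v rw.length q 1) ∧
     (((List.range' p0 len).foldl (bOuter rw M) acc).1 = false →
        ∀ q, q < p0 + len → ¬ ReachB rw M i v rw.length q 1)) := by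
  intro len
  induction len with
  | zero =>
    intro p0 _ acc _ _ ht hf
    simp only [List.range'_zero, List.foldl_nil]
    refine ⟨ht, ?_⟩
    intro h q hq
    exact (hf h).2 q (by omega)
  | succ len ih =>
    intro p0 hle acc hlen hrows ht hf
    rw [List.range'_succ, List.foldl_cons]
    have hp0 : p0 < rw.length := by omega
    cases hacc : acc.1 with
    | true =>
      have hstep : bOuter rw M acc p0 = acc := by
        unfold bOuter
        rw [hacc]
        rfl
      rw [hstep]
      have hres := ih (p0 + 1) (by omega) acc hlen hrows ht
        (by intro h; rw [hacc] at h; exact absurd h (by simp))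
      refine ⟨hres.1, ?_⟩
      intro h q hq
      exact hres.2 h q (by omega)
    | false =>
      obtain ⟨htbl, hmiss⟩ := hf hacc
      have hrowc : ∀ s, ((acc.2.getD p0 []).getD s false = true) ↔ ReachB rw M i v p0 p0 s :=
        fun s => htbl p0 s
      by_cases hhit : (acc.2.getD p0 []).getD 1 false = true
      · have hstep : bOuter rw M acc p0 = (true, acc.2) := by
          unfold bOuter
          rw [hacc]
          simp only [Bool.false_eq_true, if_false]
          rw [if_pos hhit]
        rw [hstep]
        have hone : ReachB rw M i v rw.length p0 1 :=
          reachB_mono rw M i v (by omega) p0 1 ((hrowc 1).1 hhit)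
        have hres := ih (p0 + 1) (by omega) (true, acc.2) hlen hrows
          (fun _ => ⟨p0, hone⟩)
          (by intro h; exact absurd h (by simp))
        refine ⟨hres.1, ?_⟩
        intro h q hq
        exact hres.2 h q (by omega)
      · have hhit' : (acc.2.getD p0 []).getD 1 false = false := by
          cases hx : (acc.2.getD p0 []).getD 1 false
          · rfl
          · exact absurd hx hhit
        have hstep : bOuter rw M acc p0
            = (false, (List.range' 2 (M - 1)).foldl (bInner rw M p0 (acc.2.getD p0 [])) acc.2) := by
          unfold bOuter
          rw [hacc]
          simp only [Bool.false_eq_true, if_false]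
          rw [if_neg (by rw [hhit']; exact Bool.false_ne_true)]
        rw [hstep]
        obtain ⟨hl', hr', hc'⟩ := bInnerFold rw M i v p0 acc.2 (acc.2.getD p0 []) hlen hrows hrowc htbl (M - 1)
        have hnop0 : ¬ ReachB rw M i v rw.length p0 1 := by
          intro hr
          have := reachB_shrink rw M i v rw.length p0 1 hr p0 (le_refl _)
          exact hhit ((hrowc 1).2 this)
        have hres := ih (p0 + 1) (by omega) (false, _) hl' hr'
          (by intro h; exact absurd h (by simp))
          (by
            intro _
            constructor
            · intro q a
              rw [hc' q a, reachB_succ rw M i v p0 hi hgi hv1 hvM q a]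
              constructor
              · rintro (h | ⟨s, h1, h2, h3, h4, h5, h6, h7, h8⟩)
                · exact Or.inl h
                · exact Or.inr ⟨s, h1, h2, by omega, h4, h5, h8, by omega, by rwa [← h8] at h7⟩
              · rintro (h | ⟨s, h1, h2, h3, h4, h5, h6, h7, h8⟩)
                · exact Or.inl h
                · exact Or.inr ⟨s, h1, h2, by omega, h4, h5, by omega, by rwa [h6] at h8, h6⟩
            · intro q hq
              by_cases hqe : q = p0
              · subst hqe
                exact hnop0
              · exact hmiss q (by omega))
        refine ⟨hres.1, ?_⟩
        intro h q hq
        exact hres.2 h q (by omega)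

lemma replicate_getD_false (n m a b : Nat) :
    (((List.replicate n (List.replicate m false)).getD b []).getD a false) = false := by
  by_cases hb : b < n
  · simp [List.getD_eq_getElem?_getD, List.getElem?_replicate, hb]
    by_cases ha : a < m <;> simp [ha]
  · simp [List.getD_eq_getElem?_getD, List.getElem?_replicate, hb]

lemma B_char (rw : List Bool) (v i : Int) (hne : rw ≠ []) (hi0 : 0 ≤ i) (hilt : i < (rw.length : Int))
    (hv0 : 0 ≤ v) (hvn : v ≤ (rw.length : Int)) (hgood : rw.getD i.toNat false = true) :
    canStopIterative_alt rw v i = rowFull rw i.toNat v := by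
  have hn1 : 1 ≤ rw.length := by
    cases rw
    · exact absurd rfl hne
    · simp
  have hM := bMaxS_spec (rw.length : Int) 1 (by omega) (by simp [tri]; omega)
  set maxS := bMaxS (rw.length : Int) 1 with hmaxS
  obtain ⟨hM1, -, hMlo, hMhi⟩ := hM
  have hMn : (rw.length : Int) - 1 < (tri maxS.toNat : Int) := hMhi
  rw [canStopIterative_alt]
  rw [if_neg hne]
  rw [if_neg (by simp [PySem.List.len_eq]; omega)]
  rw [if_neg (by omega)]
  rw [if_neg (by omega)]
  rw [if_neg (by simp [PySem.List.len_eq]; omega)]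
  have hget : PySem.List.pyGetD rw i false = true := by
    rw [PySem.List.pyGetD_of_nonneg rw false hi0]
    exact hgood
  rw [hget]
  simp only [Bool.not_true, Bool.false_eq_true, if_false]
  by_cases hz : v = 0
  · rw [if_pos hz, rowFull, hz]
    simp
  · rw [if_neg hz]
    have hlen' : PySem.List.len rw = ((rw.length : Nat) : Int) := PySem.List.len_eq rw
    rw [hlen']
    by_cases hvM : v > maxS
    · rw [if_pos hvM, rowFull]
      have hs : stopF rw i.toNat v.toNat = false :=
        stopF_gt rw maxS.toNat hMn i.toNat v.toNat (by omega)
      simp [hz, hs]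
    · rw [if_neg hvM]
      -- names for the parameters of the reachability development
      have hiN : i.toNat < rw.length := by omega
      have hv1N : 1 ≤ v.toNat := by omega
      have hvMN : v.toNat ≤ maxS.toNat := by omega
      have hM1N : 1 ≤ maxS.toNat := by omega
      -- initial table
      set t0 : List (List Bool) :=
        (List.replicate rw.length (List.replicate (maxS.toNat + 1) false)).set
          i.toNat ((List.replicate (maxS.toNat + 1) false).set v.toNat true) with ht0
      have ht0len : t0.length = rw.length := by
        rw [ht0, List.length_set, List.length_replicate]
      have hrep : ∀ r, r < rw.length →
          (List.replicate rw.length (List.replicate (maxS.toNat + 1) false)).getD r []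
            = List.replicate (maxS.toNat + 1) false := by
        intro r hr
        simp [List.getD_eq_getElem?_getD, List.getElem?_replicate, hr]
      have ht0rows : ∀ r, r < rw.length → ((t0.getD r []).length = maxS.toNat + 1) := by
        intro r hr
        rw [ht0]
        by_cases hri : r = i.toNat
        · subst hri
          rw [getD_set_self _ _ _ (by rw [List.length_replicate]; exact hr), List.length_set,
            List.length_replicate]
        · rw [getD_set_ne _ _ _ _ hri, hrep r hr, List.length_replicate]
      have ht0c : ∀ q a, ((t0.getD q []).getD a false = true) ↔
          ReachB rw maxS.toNat i.toNat v.toNat i.toNat q a := by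
        intro q a
        constructor
        · intro h
          have hqa : q = i.toNat ∧ a = v.toNat := by
            by_cases hqi : q = i.toNat
            · subst hqi
              rw [ht0, getD_set_self _ _ _ (by rw [List.length_replicate]; exact hiN)] at h
              by_cases hav : a = v.toNat
              · exact ⟨rfl, hav⟩
              · rw [getD_set_ne_bool _ _ _ _ hav] at h
                have hz0 : ((List.replicate (maxS.toNat + 1) false).getD a false) = false := by
                  rw [List.getD_eq_getElem?_getD, List.getElem?_replicate]
                  split_ifs <;> rfl
                rw [hz0] at h
                exact absurd h Bool.false_ne_true
            · rw [ht0, getD_set_ne _ _ _ _ hqi] at h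
              rw [replicate_getD_false] at h
              exact absurd h Bool.false_ne_true
          obtain ⟨h1, h2⟩ := hqa
          subst h1; subst h2
          exact ReachB.base
        · intro h
          obtain ⟨h1, h2⟩ := reachB_start rw maxS.toNat i.toNat v.toNat hiN hgood hv1N hvMN q a h
          subst h1; subst h2
          rw [ht0, getD_set_self _ _ _ (by rw [List.length_replicate]; exact hiN),
            getD_set_self_bool _ _ _ (by rw [List.length_replicate]; omega)]
      -- run the position loop
      have hfold := bOuterFold rw maxS.toNat i.toNat v.toNat hiN hgood hv1N hvMN hM1N
        (rw.length - i.toNat) i.toNat (by omega) (false, t0) ht0len ht0rows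
        (by intro h; exact absurd h (by simp))
        (by
          intro _
          refine ⟨ht0c, ?_⟩
          intro q hq hr
          have := (reachB_facts rw maxS.toNat i.toNat v.toNat rw.length hiN hgood hv1N hvMN q 1 hr).1
          omega)
      have hiff := stop_iff_reach_one rw maxS.toNat i.toNat v.toNat hiN hgood hv1N hvMN hMn
      show ((List.range' i.toNat (rw.length - i.toNat)).foldl (bOuter rw maxS.toNat) (false, t0)).1
        = rowFull rw i.toNat v
      have hcover : i.toNat + (rw.length - i.toNat) = rw.length := by omega
      have hres : ((List.range' i.toNat (rw.length - i.toNat)).foldl (bOuter rw maxS.toNat) (false, t0)).1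
          = stopF rw i.toNat v.toNat := by
        cases hx : ((List.range' i.toNat (rw.length - i.toNat)).foldl (bOuter rw maxS.toNat) (false, t0)).1 with
        | true =>
          exact (hiff.2 (hfold.1 hx)).symm
        | false =>
          cases hy : stopF rw i.toNat v.toNat with
          | false => rfl
          | true =>
            obtain ⟨q, hq⟩ := hiff.1 hy
            have hqn := (reachB_facts rw maxS.toNat i.toNat v.toNat rw.length hiN hgood hv1N hvMN q 1 hq).2.1
            exact absurd hq (hfold.2 hx q (by omega))
      rw [hres, rowFull]
      have h1v : decide ((1 : Int) ≤ v) = true := by simp; omega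
      have h3v : decide (v ≤ (rw.length : Int)) = true := by simp; omega
      have hzv : decide (v = 0) = false := by simp [hz]
      rw [h1v, h3v, hzv]
      simp

theorem canStopIterative_spec : Claim_equal_canStopIterative := by
  intro runway initSpeed startIndex _
  rw [Spec_canStopIterative]
  by_cases hne : runway = []
  · subst hne
    rfl
  · have c1t : ∀ {X Y : Bool}, (startIndex ≥ ((runway.length : Nat) : Int)) →
        (if startIndex ≥ PySem.List.len runway then X else Y) = X := by
      intro X Y h
      rw [if_pos (by simp [PySem.List.len_eq]; omega)]
    have c1f : ∀ {X Y : Bool}, ¬ (startIndex ≥ ((runway.length : Nat) : Int)) →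
        (if startIndex ≥ PySem.List.len runway then X else Y) = Y := by
      intro X Y h
      rw [if_neg (by simp [PySem.List.len_eq]; omega)]
    have c4t : ∀ {X Y : Bool}, (initSpeed > ((runway.length : Nat) : Int)) →
        (if initSpeed > PySem.List.len runway then X else Y) = X := by
      intro X Y h
      rw [if_pos (by simp [PySem.List.len_eq]; omega)]
    have c4f : ∀ {X Y : Bool}, ¬ (initSpeed > ((runway.length : Nat) : Int)) →
        (if initSpeed > PySem.List.len runway then X else Y) = Y := by
      intro X Y h
      rw [if_neg (by simp [PySem.List.len_eq]; omega)]
    by_cases h1 : startIndex ≥ ((runway.length : Nat) : Int)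
    · rw [canStopIterative, canStopIterative_alt, check_input, if_neg hne, if_neg hne]
      simp only [Bool.not_true, Bool.false_eq_true, if_false]
      rw [c1t h1, c1t h1]
    · by_cases h2 : startIndex < 0
      · rw [canStopIterative, canStopIterative_alt, check_input, if_neg hne, if_neg hne]
        simp only [Bool.not_true, Bool.false_eq_true, if_false]
        rw [c1f h1, c1f h1, if_pos h2, if_pos h2]
      · by_cases h3 : initSpeed < 0
        · rw [canStopIterative, canStopIterative_alt, check_input, if_neg hne, if_neg hne]
          simp only [Bool.not_true, Bool.false_eq_true, if_false]
          rw [c1f h1, c1f h1, if_neg h2, if_neg h2, if_pos h3, if_pos h3]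
        · by_cases h4 : initSpeed > ((runway.length : Nat) : Int)
          · rw [canStopIterative, canStopIterative_alt, check_input, if_neg hne, if_neg hne]
            simp only [Bool.not_true, Bool.false_eq_true, if_false]
            rw [c1f h1, c1f h1, if_neg h2, if_neg h2, if_neg h3, if_neg h3, c4t h4, c4t h4]
          · by_cases h5 : PySem.List.pyGetD runway startIndex false = true
            · have hgood : runway.getD startIndex.toNat false = true := by
                rwa [PySem.List.pyGetD_of_nonneg runway false (by omega)] at h5
              rw [A_char runway initSpeed startIndex hne (by omega) (by omega) (by omega) (by omega) hgood]
              rw [B_char runway initSpeed startIndex hne (by omega) (by omega) (by omega) (by omega) hgood]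
            · have h5' : PySem.List.pyGetD runway startIndex false = false := by
                cases hx : PySem.List.pyGetD runway startIndex false
                · rfl
                · exact absurd hx h5
              rw [canStopIterative, canStopIterative_alt, check_input, if_neg hne, if_neg hne]
              simp only [Bool.not_true, Bool.false_eq_true, if_false]
              rw [c1f h1, c1f h1, if_neg h2, if_neg h2, if_neg h3, if_neg h3, c4f h4, c4f h4]
              rw [h5']
              simp only [Bool.not_false, if_true]
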